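-- pv_equiv track=rewrite | github.com/saper-2/python-si7021 | si7021_test_no_class.py | crc8_update
-- ===== SOURCE A (Python) =====
-- def crc8_update(b, crc):
-- 	for i in range(8):
-- 		if ( ((b^crc) & 0x80) == 0x80 ):
-- 			crc = crc<<1
-- 			crc = crc^0x31
-- 		else:
-- 			crc = crc<<1
-- 		b = b << 1
--
-- 	crc = crc & 0xFF
-- 	return crc
-- ===== SOURCE B (Python) =====
-- # Table-driven CRC8 (poly 0x31): one indexed fetch replaces the 8-iteration bit loop.
-- _CRC8 = [
--     0, 49, 98, 83, 196, 245, 166, 151, 185, 136, 219, 234, 125, 76, 31, 46,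
--     67, 114, 33, 16, 135, 182, 229, 212, 250, 203, 152, 169, 62, 15, 92, 109,
--     134, 183, 228, 213, 66, 115, 32, 17, 63, 14, 93, 108, 251, 202, 153, 168,
--     197, 244, 167, 150, 1, 48, 99, 82, 124, 77, 30, 47, 184, 137, 218, 235,
--     61, 12, 95, 110, 249, 200, 155, 170, 132, 181, 230, 215, 64, 113, 34, 19,
--     126, 79, 28, 45, 186, 139, 216, 233, 199, 246, 165, 148, 3, 50, 97, 80,
--     187, 138, 217, 232, 127, 78, 29, 44, 2, 51, 96, 81, 198, 247, 164, 149,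
--     248, 201, 154, 171, 60, 13, 94, 111, 65, 112, 35, 18, 133, 180, 231, 214,
--     122, 75, 24, 41, 190, 143, 220, 237, 195, 242, 161, 144, 7, 54, 101, 84,
--     57, 8, 91, 106, 253, 204, 159, 174, 128, 177, 226, 211, 68, 117, 38, 23,
--     252, 205, 158, 175, 56, 9, 90, 107, 69, 116, 39, 22, 129, 176, 227, 210,
--     191, 142, 221, 236, 123, 74, 25, 40, 6, 55, 100, 85, 194, 243, 160, 145,
--     71, 118, 37, 20, 131, 178, 225, 208, 254, 207, 156, 173, 58, 11, 88, 105,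
--     4, 53, 102, 87, 192, 241, 162, 147, 189, 140, 223, 238, 121, 72, 27, 42,
--     193, 240, 163, 146, 5, 52, 103, 86, 120, 73, 26, 43, 188, 141, 222, 239,
--     130, 179, 224, 209, 70, 119, 36, 21, 59, 10, 89, 104, 255, 206, 157, 172,
-- ]
--
--
-- def crc8_update(b, crc):
--     return _CRC8[(b ^ crc) & 0xFF]
-- ===== Notes on version B (the rewrite author's own statement) =====
-- stated objective: faster
-- what changed: Replaces the per-call 8-iteration bit loop with a precomputed 256-entry module-level lookup table indexed by (b ^ crc) & 0xFF (standard table-driven CRC).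
import Mathlib
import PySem

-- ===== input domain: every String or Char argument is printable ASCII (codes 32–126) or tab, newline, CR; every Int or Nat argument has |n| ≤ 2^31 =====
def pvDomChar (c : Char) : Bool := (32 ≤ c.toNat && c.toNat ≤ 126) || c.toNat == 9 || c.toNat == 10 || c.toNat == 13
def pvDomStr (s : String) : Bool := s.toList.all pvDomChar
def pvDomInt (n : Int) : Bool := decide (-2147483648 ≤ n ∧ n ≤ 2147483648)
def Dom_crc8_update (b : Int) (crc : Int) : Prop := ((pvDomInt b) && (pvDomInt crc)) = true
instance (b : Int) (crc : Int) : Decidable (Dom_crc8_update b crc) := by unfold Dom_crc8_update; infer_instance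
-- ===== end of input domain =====

-- B replaces A's per-call 8-iteration CRC8 bit loop by a single lookup in a precomputed
-- 256-entry table indexed by (b ^ crc) & 0xFF (the standard table-driven CRC formulation).

-- ===== PORT A =====
def crc8_update (b : Int) (crc : Int) : Int :=
  let s := (PySem.List.pyRange 0 8 1).foldl
    (fun (s : Int × Int) (_ : Int) =>
      let b := s.1
      let crc := s.2
      let crc := if PySem.Int.band (PySem.Int.bxor b crc) 0x80 == 0x80
                 then PySem.Int.bxor (crc <<< (1 : Nat)) 0x31
                 else crc <<< (1 : Nat)
      (b <<< (1 : Nat), crc)) (b, crc)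
  PySem.Int.band s.2 0xFF

-- ===== PORT B =====
def pvCRC8Table : List Int :=
  [0, 49, 98, 83, 196, 245, 166, 151, 185, 136, 219, 234, 125, 76, 31, 46,
  67, 114, 33, 16, 135, 182, 229, 212, 250, 203, 152, 169, 62, 15, 92, 109,
  134, 183, 228, 213, 66, 115, 32, 17, 63, 14, 93, 108, 251, 202, 153, 168,
  197, 244, 167, 150, 1, 48, 99, 82, 124, 77, 30, 47, 184, 137, 218, 235,
  61, 12, 95, 110, 249, 200, 155, 170, 132, 181, 230, 215, 64, 113, 34, 19,
  126, 79, 28, 45, 186, 139, 216, 233, 199, 246, 165, 148, 3, 50, 97, 80,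
  187, 138, 217, 232, 127, 78, 29, 44, 2, 51, 96, 81, 198, 247, 164, 149,
  248, 201, 154, 171, 60, 13, 94, 111, 65, 112, 35, 18, 133, 180, 231, 214,
  122, 75, 24, 41, 190, 143, 220, 237, 195, 242, 161, 144, 7, 54, 101, 84,
  57, 8, 91, 106, 253, 204, 159, 174, 128, 177, 226, 211, 68, 117, 38, 23,
  252, 205, 158, 175, 56, 9, 90, 107, 69, 116, 39, 22, 129, 176, 227, 210,
  191, 142, 221, 236, 123, 74, 25, 40, 6, 55, 100, 85, 194, 243, 160, 145,
  71, 118, 37, 20, 131, 178, 225, 208, 254, 207, 156, 173, 58, 11, 88, 105,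
  4, 53, 102, 87, 192, 241, 162, 147, 189, 140, 223, 238, 121, 72, 27, 42,
  193, 240, 163, 146, 5, 52, 103, 86, 120, 73, 26, 43, 188, 141, 222, 239,
  130, 179, 224, 209, 70, 119, 36, 21, 59, 10, 89, 104, 255, 206, 157, 172]

-- the index (b ^ crc) & 0xFF is provably in [0, 256), so Python's list indexing never
-- raises; the '.getD 0' default of the option is unreachable
def crc8_update_alt (b : Int) (crc : Int) : Int :=
  (PySem.List.pyGet? pvCRC8Table (PySem.Int.band (PySem.Int.bxor b crc) 0xFF)).getD 0

-- ===== PRECONDITION & SPEC =====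
def Spec_crc8_update (b : Int) (crc : Int) (out : Int) : Prop := out = crc8_update_alt b crc
instance (b : Int) (crc : Int) (out : Int) : Decidable (Spec_crc8_update b crc out) := by unfold Spec_crc8_update; infer_instance

-- ===== CLAIM (what is proved, stated in full; the proofs are below) =====
def Claim_equal_crc8_update : Prop := ∀ (b : Int) (crc : Int), Dom_crc8_update b crc → Spec_crc8_update b crc (crc8_update b crc)

-- ===== LEMMAS AND PROOFS =====

-- the state of A's loop, as a structural recursion (proof-side mirror of the fold)
def pvLoop : Nat → Int → Int → Int
  | 0, _, c => c
  | n+1, b, c => pvLoop n (b <<< (1 : Nat))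
      (if PySem.Int.band (PySem.Int.bxor b c) 128 == 128
       then PySem.Int.bxor (c <<< (1 : Nat)) 49
       else c <<< (1 : Nat))

-- the conditional feedback term of one iteration
def pvE (x : Int) : Int := if x.testBit 7 then 49 else 0

theorem pvPortA_eq (b c : Int) : crc8_update b c = PySem.Int.band (pvLoop 8 b c) 255 := by
  have h : PySem.List.pyRange 0 8 1 = [0,1,2,3,4,5,6,7] := by decide
  simp only [crc8_update, h, List.foldl, pvLoop]

theorem pvShl (a : Int) : a <<< (1 : Nat) = 2 * a := by
  rw [Int.shiftLeft_eq]; ring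

-- ---- bridges from PySem's bitwise ops to Mathlib's Int.xor / Int.land ----

theorem pvLdiffAdd (m : Nat) : ∀ n : Nat, Nat.ldiff m n + (m &&& n) = m := by
  induction m using Nat.binaryRec with
  | zero =>
      intro n
      have h1 : Nat.ldiff 0 n = 0 := Nat.eq_of_testBit_eq (by simp [Nat.testBit_ldiff])
      simp [h1]
  | bit b m ih =>
      intro n
      rw [← Nat.bit_testBit_zero_shiftRight_one n, Nat.ldiff_bit, Nat.land_bit,
        Nat.bit_val, Nat.bit_val, Nat.bit_val]
      have := ih (n >>> 1)
      cases b <;> cases n.testBit 0 <;> simp [Bool.toNat] <;> omega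

theorem pvSubAnd (m n : Nat) : m - (m &&& n) = Nat.ldiff m n := by
  have h := pvLdiffAdd m n
  omega

theorem pvBxorEq (a b : Int) : PySem.Int.bxor a b = Int.xor a b := by
  cases a <;> cases b <;>
    simp [PySem.Int.bxor, Int.xor, Int.negSucc_eq] <;> omega

theorem pvBandEq (a b : Int) : PySem.Int.band a b = Int.land a b := by
  cases a <;> cases b <;>
    simp [PySem.Int.band, Int.land, Int.negSucc_eq, pvSubAnd] <;> omega

theorem pvTbXor (a b : Int) (k : Nat) :
    (PySem.Int.bxor a b).testBit k = ((a.testBit k) ^^ (b.testBit k)) := by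
  rw [pvBxorEq, Int.testBit_lxor]

theorem pvTbAnd (a b : Int) (k : Nat) :
    (PySem.Int.band a b).testBit k = ((a.testBit k) && (b.testBit k)) := by
  rw [pvBandEq, Int.testBit_land]

-- ---- extensionality for Int by bits ----

theorem pvIntExt (m n : Int) (h : ∀ k, m.testBit k = n.testBit k) : m = n := by
  cases m with
  | ofNat a =>
      cases n with
      | ofNat b =>
          have : a = b := Nat.eq_of_testBit_eq (fun k => h k)
          simp [this]
      | negSucc b =>
          exfalso
          have hk := h (a + b)
          have ha : a.testBit (a + b) = false :=
            Nat.testBit_lt_two_pow (lt_of_lt_of_le (Nat.lt_two_pow_self)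
              (Nat.pow_le_pow_right (by norm_num) (Nat.le_add_right a b)))
          have hb : b.testBit (a + b) = false :=
            Nat.testBit_lt_two_pow (lt_of_lt_of_le (Nat.lt_two_pow_self)
              (Nat.pow_le_pow_right (by norm_num) (Nat.le_add_left b a)))
          have : (Int.ofNat a).testBit (a + b) = a.testBit (a + b) := rfl
          have h2 : (Int.negSucc b).testBit (a + b) = !(b.testBit (a + b)) := rfl
          rw [this, h2, ha, hb] at hk
          exact Bool.false_ne_true hk
  | negSucc a =>
      cases n with
      | ofNat b =>
          exfalso
          have hk := h (a + b)
          have ha : a.testBit (a + b) = false :=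
            Nat.testBit_lt_two_pow (lt_of_lt_of_le (Nat.lt_two_pow_self)
              (Nat.pow_le_pow_right (by norm_num) (Nat.le_add_right a b)))
          have hb : b.testBit (a + b) = false :=
            Nat.testBit_lt_two_pow (lt_of_lt_of_le (Nat.lt_two_pow_self)
              (Nat.pow_le_pow_right (by norm_num) (Nat.le_add_left b a)))
          have h1 : (Int.negSucc a).testBit (a + b) = !(a.testBit (a + b)) := rfl
          have h2 : (Int.ofNat b).testBit (a + b) = b.testBit (a + b) := rfl
          rw [h1, h2, ha, hb] at hk
          exact Bool.false_ne_true hk.symm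
      | negSucc b =>
          have : a = b := Nat.eq_of_testBit_eq (fun k => by
            have := h k
            have h1 : (Int.negSucc a).testBit k = !(a.testBit k) := rfl
            have h2 : (Int.negSucc b).testBit k = !(b.testBit k) := rfl
            rw [h1, h2] at this
            exact Bool.not_inj this)
          simp [this]

-- ---- testBit facts ----

theorem pvTbZero (k : Nat) : (0 : Int).testBit k = false := by
  have : (0 : Int).testBit k = (0 : Nat).testBit k := rfl
  simp [this]

theorem pvTbTwoMulZero (a : Int) : (2 * a).testBit 0 = false := by
  have : 2 * a = Int.bit false a := by simp [Int.bit_val]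
  rw [this, Int.testBit_bit_zero]

theorem pvTbTwoMulSucc (a : Int) (k : Nat) : (2 * a).testBit (k + 1) = a.testBit k := by
  have : 2 * a = Int.bit false a := by simp [Int.bit_val]
  rw [this, Int.testBit_bit_succ]

theorem pvTb255 (k : Nat) : (255 : Int).testBit k = decide (k < 8) := by
  have h : (255 : Int).testBit k = (255 : Nat).testBit k := rfl
  have h2 : (255 : Nat) = 2 ^ 8 - 1 := by norm_num
  rw [h, h2, Nat.testBit_two_pow_sub_one]

theorem pvTb128 (k : Nat) : (128 : Int).testBit k = decide (7 = k) := by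
  have h : (128 : Int).testBit k = (128 : Nat).testBit k := rfl
  have h2 : (128 : Nat) = 2 ^ 7 := by norm_num
  rw [h, h2, Nat.testBit_two_pow]

theorem pvTbPowMul (n : Nat) (a : Int) : ∀ k : Nat,
    (2 ^ n * a).testBit k = if n ≤ k then a.testBit (k - n) else false := by
  induction n with
  | zero => intro k; simp
  | succ n ih =>
      intro k
      have : (2 : Int) ^ (n + 1) * a = 2 * (2 ^ n * a) := by ring
      rw [this]
      cases k with
      | zero => simp [pvTbTwoMulZero]
      | succ k =>
          rw [pvTbTwoMulSucc, ih k]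
          simp [Nat.succ_le_succ_iff, Nat.succ_sub_succ]

-- ---- xor algebra for PySem.Int.bxor, by extensionality ----

theorem pvBxorZero (a : Int) : PySem.Int.bxor a 0 = a := by
  apply pvIntExt; intro k; simp [pvTbXor, pvTbZero]

theorem pvZeroBxor (a : Int) : PySem.Int.bxor 0 a = a := by
  apply pvIntExt; intro k; simp [pvTbXor, pvTbZero]

theorem pvBxorAssoc (a b c : Int) :
    PySem.Int.bxor (PySem.Int.bxor a b) c = PySem.Int.bxor a (PySem.Int.bxor b c) := by
  apply pvIntExt; intro k
  simp [pvTbXor, Bool.xor_assoc]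

theorem pvBxorShuffle (a b c d : Int) :
    PySem.Int.bxor (PySem.Int.bxor a b) (PySem.Int.bxor c d) =
      PySem.Int.bxor (PySem.Int.bxor a c) (PySem.Int.bxor b d) := by
  apply pvIntExt; intro k
  simp only [pvTbXor]
  cases a.testBit k <;> cases b.testBit k <;> cases c.testBit k <;> cases d.testBit k <;> rfl

theorem pvTwoMulBxor (a b : Int) :
    2 * PySem.Int.bxor a b = PySem.Int.bxor (2 * a) (2 * b) := by
  apply pvIntExt; intro k
  cases k with
  | zero => simp [pvTbXor, pvTbTwoMulZero]
  | succ k => simp [pvTbXor, pvTbTwoMulSucc]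

theorem pvPowMulBxor (n : Nat) (a b : Int) :
    2 ^ n * PySem.Int.bxor a b = PySem.Int.bxor (2 ^ n * a) (2 ^ n * b) := by
  apply pvIntExt; intro k
  simp only [pvTbXor, pvTbPowMul]
  split_ifs <;> simp [pvTbXor]

theorem pvBandBxor (a b m : Int) :
    PySem.Int.band (PySem.Int.bxor a b) m =
      PySem.Int.bxor (PySem.Int.band a m) (PySem.Int.band b m) := by
  apply pvIntExt; intro k
  simp only [pvTbXor, pvTbAnd]
  cases a.testBit k <;> cases b.testBit k <;> cases m.testBit k <;> rfl

-- ---- the loop in algebraic form ----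

theorem pvCond (x c : Int) :
    (if PySem.Int.band x 128 == 128 then PySem.Int.bxor (2 * c) 49 else 2 * c) =
      PySem.Int.bxor (2 * c) (pvE x) := by
  have hb : PySem.Int.band x 128 = if x.testBit 7 then 128 else 0 := by
    apply pvIntExt; intro k
    by_cases hk : k = 7
    · subst hk
      cases h : x.testBit 7 <;> simp [pvTbAnd, pvTb128, h] <;> decide
    · cases h : x.testBit 7 <;>
        simp [pvTbAnd, pvTb128, h, pvTbZero, Ne.symm hk] <;>
        simp [Int.testBit, hk]
  rw [hb, pvE]
  cases h : x.testBit 7 <;> simp [pvBxorZero]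

theorem pvLoopSucc (n : Nat) (b c : Int) :
    pvLoop (n + 1) b c =
      pvLoop n (2 * b) (PySem.Int.bxor (2 * c) (pvE (PySem.Int.bxor b c))) := by
  show pvLoop n _ _ = _
  rw [pvShl, pvShl, pvCond]

theorem pvEAdd (x y : Int) :
    pvE (PySem.Int.bxor x y) = PySem.Int.bxor (pvE x) (pvE y) := by
  unfold pvE
  rw [pvTbXor]
  cases hx : x.testBit 7 <;> cases hy : y.testBit 7 <;> simp <;> decide

theorem pvLin : ∀ (n : Nat) (b c : Int),
    pvLoop n b c =
      PySem.Int.bxor (2 ^ n * c) (pvLoop n (PySem.Int.bxor b c) 0) := by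
  intro n
  induction n with
  | zero => intro b c; simp [pvLoop, pvBxorZero]
  | succ n ih =>
      intro b c
      rw [pvLoopSucc, ih, pvLoopSucc (b := PySem.Int.bxor b c) (c := 0)]
      rw [show (2 : Int) * 0 = 0 by ring, pvBxorZero, pvZeroBxor,
        ih (2 * PySem.Int.bxor b c) (pvE (PySem.Int.bxor b c))]
      rw [pvPowMulBxor, pvTwoMulBxor]
      rw [pvBxorAssoc]
      congr 1
      · ring
      · congr 2
        rw [pvBxorAssoc]

theorem pvGAdd : ∀ (n : Nat) (u v : Int),
    pvLoop n (PySem.Int.bxor u v) 0 =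
      PySem.Int.bxor (pvLoop n u 0) (pvLoop n v 0) := by
  intro n
  induction n with
  | zero => intro u v; simp [pvLoop, pvBxorZero]
  | succ n ih =>
      intro u v
      have expand : ∀ w : Int, pvLoop (n + 1) w 0 =
          PySem.Int.bxor (2 ^ n * pvE w) (pvLoop n (PySem.Int.bxor (2 * w) (pvE w)) 0) := by
        intro w
        rw [pvLoopSucc, show (2 : Int) * 0 = 0 by ring, pvBxorZero, pvZeroBxor,
          pvLin n (2 * w) (pvE w)]
      rw [expand, expand u, expand v, pvEAdd, pvTwoMulBxor, pvPowMulBxor]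
      rw [show PySem.Int.bxor (PySem.Int.bxor (2*u) (2*v)) (PySem.Int.bxor (pvE u) (pvE v)) =
            PySem.Int.bxor (PySem.Int.bxor (2*u) (pvE u)) (PySem.Int.bxor (2*v) (pvE v))
          from pvBxorShuffle _ _ _ _]
      rw [ih]
      rw [pvBxorShuffle]

theorem pvVanish : ∀ (n : Nat) (y : Int), PySem.Int.band y 255 = 0 → pvLoop n y 0 = 0 := by
  intro n
  induction n with
  | zero => intro y _; rfl
  | succ n ih =>
      intro y h
      have hbit : ∀ k : Nat, k < 8 → y.testBit k = false := by
        intro k hk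
        have := congrArg (fun z : Int => z.testBit k) h
        simp only [pvTbAnd, pvTb255, pvTbZero, hk, decide_true, Bool.and_true] at this
        exact this
      have hE : pvE y = 0 := by simp [pvE, hbit 7 (by norm_num)]
      have h2 : PySem.Int.band (2 * y) 255 = 0 := by
        apply pvIntExt; intro k
        simp only [pvTbAnd, pvTb255, pvTbZero]
        cases k with
        | zero => simp [pvTbTwoMulZero]
        | succ k =>
            rw [pvTbTwoMulSucc]
            by_cases hk : k + 1 < 8
            · simp [hbit k (by omega), hk]
            · simp [hk]
      rw [pvLoopSucc, show (2 : Int) * 0 = 0 by ring, pvBxorZero, hE, pvBxorZero]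
      exact ih (2 * y) h2

theorem pvDecomp (x : Int) :
    PySem.Int.bxor (PySem.Int.band x 255) (PySem.Int.bxor x (PySem.Int.band x 255)) = x := by
  apply pvIntExt; intro k
  simp only [pvTbXor, pvTbAnd]
  cases x.testBit k <;> cases (255 : Int).testBit k <;> rfl

theorem pvResid (x : Int) :
    PySem.Int.band (PySem.Int.bxor x (PySem.Int.band x 255)) 255 = 0 := by
  apply pvIntExt; intro k
  simp only [pvTbXor, pvTbAnd, pvTbZero]
  cases x.testBit k <;> cases (255 : Int).testBit k <;> rfl

theorem pvHiMask (c : Int) : PySem.Int.band (2 ^ 8 * c) 255 = 0 := by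
  apply pvIntExt; intro k
  simp only [pvTbAnd, pvTb255, pvTbZero, pvTbPowMul]
  by_cases hk : k < 8
  · simp [show ¬ (8 ≤ k) by omega, hk]
  · simp [hk]

theorem pvMaskRange (x : Int) : ∃ m : Nat, m < 256 ∧ PySem.Int.band x 255 = (m : Int) := by
  unfold PySem.Int.band
  split_ifs with h1 h2 h3
  · exact ⟨x.toNat &&& (255 : Int).toNat, by
      have := Nat.and_le_right (n := x.toNat) (m := (255 : Int).toNat); omega, rfl⟩
  · norm_num at h2
  · exact ⟨(255 : Int).toNat - ((255 : Int).toNat &&& (-x - 1).toNat), by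
      have : (255 : Int).toNat = 255 := rfl
      omega, rfl⟩
  · norm_num at h3

-- Nat-level mirror of the loop, so the 256-case table check runs on kernel-accelerated Nat
def pvNatLoop : Nat → Nat → Nat → Nat
  | 0, _, c => c
  | n+1, b, c => pvNatLoop n (b <<< 1)
      (if (b ^^^ c) &&& 128 == 128 then (c <<< 1) ^^^ 49 else c <<< 1)

theorem pvShlNat (x : Nat) : ((x : Int)) <<< (1 : Nat) = ((x <<< 1 : Nat) : Int) := by
  rw [Int.shiftLeft_eq, Nat.shiftLeft_eq]
  push_cast
  ring

theorem pvLift : ∀ (n : Nat) (x y : Nat),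
    pvLoop n ((x : Nat) : Int) ((y : Nat) : Int) = ((pvNatLoop n x y : Nat) : Int) := by
  intro n
  induction n with
  | zero => intro x y; rfl
  | succ n ih =>
      intro x y
      show pvLoop n _ _ = _
      have h128 : (128 : Int) = ((128 : Nat) : Int) := rfl
      have h49 : (49 : Int) = ((49 : Nat) : Int) := rfl
      rw [PySem.Int.bxor_natCast, h128, PySem.Int.band_natCast]
      have hbeq : ((((x ^^^ y) &&& 128 : Nat) : Int) == ((128 : Nat) : Int)) =
          ((x ^^^ y) &&& 128 == 128) := by
        simp [beq_iff_eq] <;> omega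
      rw [hbeq]
      by_cases hc : ((x ^^^ y) &&& 128 == 128) = true
      · have hstep : pvNatLoop (n + 1) x y = pvNatLoop n (x <<< 1) ((y <<< 1) ^^^ 49) := by
          rw [pvNatLoop, if_pos hc]
        rw [if_pos hc, pvShlNat x, pvShlNat y, h49, PySem.Int.bxor_natCast, ih, hstep]
      · have hstep : pvNatLoop (n + 1) x y = pvNatLoop n (x <<< 1) (y <<< 1) := by
          rw [pvNatLoop, if_neg hc]
        rw [if_neg hc, pvShlNat x, pvShlNat y, ih, hstep]

set_option maxRecDepth 40000 in
theorem pvTable : ∀ m : Nat, m < 256 →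
    (PySem.List.pyGet? pvCRC8Table ((m : Nat) : Int)).getD 0 =
      ((pvNatLoop 8 m 0 &&& 255 : Nat) : Int) := by decide

theorem pvMain (b c : Int) : crc8_update b c = crc8_update_alt b c := by
  obtain ⟨m, hm, hx⟩ := pvMaskRange (PySem.Int.bxor b c)
  rw [pvPortA_eq, pvLin 8 b c, pvBandBxor, pvHiMask, pvZeroBxor]
  conv_lhs => rw [← pvDecomp (PySem.Int.bxor b c)]
  rw [pvGAdd, pvVanish 8 _ (pvResid (PySem.Int.bxor b c)), pvBxorZero, hx]
  have h0 : (0 : Int) = ((0 : Nat) : Int) := rfl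
  have h255 : (255 : Int) = ((255 : Nat) : Int) := rfl
  rw [h0, pvLift 8 m 0, h255, PySem.Int.band_natCast, ← pvTable m hm]
  unfold crc8_update_alt
  rw [hx]

-- ===== VERDICT (by name: the statement is the Claim_ definition above) =====
theorem crc8_update_spec : Claim_equal_crc8_update := by
  intro b c _
  unfold Spec_crc8_update
  exact pvMain b c
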